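-- pv_equiv track=rewrite | github.com/WiekeHarmsen/SERDA-experiment-repo | 01-stories-align-prompt-whispert.py | makeSplit
-- ===== SOURCE A (Python) =====
-- def makeSplit(targetPartsList, origPartsList, target_text, original_text, original_space_idx, max_length):
--
--     # Get slice to split on
--     original_slice = original_text[original_space_idx-3:original_space_idx+3]
--
--     # Find slice in target text
--     target_slice_idx = target_text.find(
--         original_slice)
--
--     # If slice is found in target text
--     if (target_slice_idx != -1 and len(original_slice) != 0):
--
--         # Split the target_text and original_text on the space in the overlapping slice
--         # Add the first part to the partLists
--         target_space_idx = target_slice_idx+3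
--         targetPartsList.append(target_text[:target_space_idx])
--         origPartsList.append(original_text[:original_space_idx])
--
--         # Remove the first part from the target_text and original_text
--         target_text = target_text[target_space_idx+1:]
--         original_text = original_text[original_space_idx+1:]
--
--         if (len(original_text) < 80 or len(target_text) < 80):
--             # End of file reached
--             targetPartsList.append(target_text)
--             origPartsList.append(original_text)
--             target_text = ''
--             original_text = ''
--             idx_of_next_space = -1
--
--             return targetPartsList, origPartsList, target_text, original_text, idx_of_next_space, max_length
--         else:
--             # reset around_idx
--             new_space_idx = original_text.find(" ", max_length)
--
--             # make next split
--             return makeSplit(targetPartsList, origPartsList, target_text, original_text, new_space_idx, max_length)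
--
--     # If slice is not found in target text
--     else:
--         # reset around_idx to next space
--         idx_of_next_space = original_text.find(" ", original_space_idx+1)
--         if (idx_of_next_space == -1):
--             # End of file reached
--             targetPartsList.append(target_text)
--             origPartsList.append(original_text)
--             return targetPartsList, origPartsList, target_text, original_text, idx_of_next_space, max_length
--         else:
--             return makeSplit(targetPartsList, origPartsList, target_text, original_text, idx_of_next_space, max_length)
-- ===== SOURCE B (Python) =====
-- # Iterative rewrite: a scanning helper advances the space index until an
-- # aligned window is found (or runs out), and a flat outer loop performs the
-- # splits; same list mutation order as the original recursion.
--
-- def _scan(target_text, original_text, space_idx):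
--     """Advance space_idx until original_text[space_idx-3:space_idx+3] is a
--     nonempty window found in target_text; return (space_idx, hit) or None."""
--     while True:
--         window = original_text[space_idx - 3:space_idx + 3]
--         hit = target_text.find(window) if window else -1
--         if hit != -1:
--             return space_idx, hit
--         space_idx = original_text.find(' ', space_idx + 1)
--         if space_idx == -1:
--             return None
--
--
-- def makeSplit(targetPartsList, origPartsList, target_text, original_text, original_space_idx, max_length):
--     space_idx = original_space_idx
--     while True:
--         found = _scan(target_text, original_text, space_idx)
--         if found is None:
--             targetPartsList.append(target_text)
--             origPartsList.append(original_text)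
--             return targetPartsList, origPartsList, target_text, original_text, -1, max_length
--         space_idx, hit = found
--         targetPartsList.append(target_text[:hit + 3])
--         origPartsList.append(original_text[:space_idx])
--         target_text = target_text[hit + 4:]
--         original_text = original_text[space_idx + 1:]
--         if len(original_text) < 80 or len(target_text) < 80:
--             targetPartsList.append(target_text)
--             origPartsList.append(original_text)
--             return targetPartsList, origPartsList, '', '', -1, max_length
--         space_idx = original_text.find(' ', max_length)
-- ===== Notes on version B (the rewrite author's own statement) =====
-- stated objective: alternative
-- what changed: The single self-recursive function is re-decomposed into a separate scanning helper (which advances the space index until an aligned window is found or runs out) plus a flat outer splitting loop, instead of one recursion handling both concerns.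
import Mathlib
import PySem

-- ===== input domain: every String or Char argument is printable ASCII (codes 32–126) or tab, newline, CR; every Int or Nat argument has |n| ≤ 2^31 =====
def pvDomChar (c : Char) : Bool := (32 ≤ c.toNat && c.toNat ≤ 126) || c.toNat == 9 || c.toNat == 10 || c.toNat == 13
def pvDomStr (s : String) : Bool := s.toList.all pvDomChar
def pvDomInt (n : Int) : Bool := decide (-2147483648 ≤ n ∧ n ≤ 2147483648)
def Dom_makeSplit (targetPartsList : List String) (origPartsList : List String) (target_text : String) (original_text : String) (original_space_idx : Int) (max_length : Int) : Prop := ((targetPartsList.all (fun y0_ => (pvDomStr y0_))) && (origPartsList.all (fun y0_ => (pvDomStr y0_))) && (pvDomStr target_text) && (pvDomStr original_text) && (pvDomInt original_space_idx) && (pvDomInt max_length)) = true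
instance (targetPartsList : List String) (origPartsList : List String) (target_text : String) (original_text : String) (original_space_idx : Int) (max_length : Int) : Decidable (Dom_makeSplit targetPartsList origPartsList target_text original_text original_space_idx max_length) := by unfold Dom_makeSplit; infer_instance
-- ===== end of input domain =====

-- B is a re-decomposition of A (a scanning helper + a flat splitting loop replacing the single
-- recursion); same return value, and both mutate the two part lists by the same appends in order.

-- Termination measure helper: how much room the space index still has inside original_text.
def pvGap (ot : List Char) (i : Int) : Nat :=
  if i < 0 then ot.length + 2 else ot.length + 1 - i.toNat

-- facts needed by both ports' termination proofs (cited in decreasing_by)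
theorem pv_find_lt_length (l : List Char) (h : PySem.Chars.find l [' '] ≠ -1) :
    PySem.Chars.find l [' '] < l.length := by
  have h0 := PySem.Chars.neg_one_le_find l [' ']
  have hspec := PySem.Chars.find_spec (s := l) (sub := [' ']) (by omega)
  have h1 := hspec.1.length_le
  simp at h1
  omega

theorem pv_findFrom_space_bounds (s : List Char) (start : Int)
    (h : PySem.Chars.findFrom s [' '] start ≠ -1) :
    0 ≤ PySem.Chars.findFrom s [' '] start ∧ start ≤ PySem.Chars.findFrom s [' '] start ∧
      PySem.Chars.findFrom s [' '] start < s.length := by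
  simp only [PySem.Chars.findFrom] at h ⊢
  split_ifs at h ⊢ with h1 h2 h3 h4 h5 h6 h7 h8 <;> simp_all
  · have ha := PySem.Chars.neg_one_le_find s [' ']
    have hb := pv_find_lt_length s h4
    omega
  · have ha := PySem.Chars.neg_one_le_find (List.drop (start + ↑s.length).toNat s) [' ']
    have hb := pv_find_lt_length _ h6
    simp [List.length_drop] at hb
    omega
  · have ha := PySem.Chars.neg_one_le_find (List.drop start.toNat s) [' ']
    have hb := pv_find_lt_length _ h8
    simp [List.length_drop] at hb
    omega

theorem pv_gap_decr (ot : List Char) (osi : Int)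
    (h : PySem.Chars.findFrom ot [' '] (osi + 1) ≠ -1) :
    pvGap ot (PySem.Chars.findFrom ot [' '] (osi + 1)) < pvGap ot osi := by
  obtain ⟨h0, h1, h2⟩ := pv_findFrom_space_bounds ot (osi + 1) h
  unfold pvGap; split_ifs <;> omega

theorem pv_slice_from_length {α : Type} (xs : List α) (i : Int) (hi : 0 ≤ i) :
    (PySem.List.slice xs (some i) none).length = xs.length - min i.toNat xs.length := by
  simp only [PySem.List.slice, PySem.List.clampIdx, List.length_take, List.length_drop]
  split_ifs <;> omega

theorem pv_slice_from_length_lt {α : Type} (xs : List α) (i : Int) (h1 : 1 ≤ i)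
    (hxs : xs ≠ []) : (PySem.List.slice xs (some i) none).length < xs.length := by
  have := pv_slice_from_length xs i (by omega)
  have hl : 0 < xs.length := List.length_pos_of_ne_nil hxs
  omega

theorem pv_find_window_pos (tt w : List Char) (hne : w ≠ [])
    (h : PySem.Chars.find tt w ≠ -1) :
    0 ≤ PySem.Chars.find tt w ∧ tt ≠ [] := by
  have h0 := PySem.Chars.neg_one_le_find tt w
  have hinf : w <:+: tt := (PySem.Chars.find_ne_neg_one_iff tt w).mp h
  refine ⟨by omega, ?_⟩
  intro hnil
  rw [hnil] at hinf
  exact hne (List.eq_nil_of_infix_nil hinf)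

-- ===== PORT A =====
-- literal transliteration of A's recursion, on the code-point lists of the two texts
def makeSplitCore (targetPartsList origPartsList : List String) (target_text original_text : List Char)
    (original_space_idx max_length : Int) :
    List String × List String × String × String × Int × Int :=
  -- original_slice = original_text[original_space_idx-3:original_space_idx+3]
  let original_slice := PySem.List.slice original_text (some (original_space_idx - 3)) (some (original_space_idx + 3))
  -- target_slice_idx = target_text.find(original_slice)
  let target_slice_idx := PySem.Chars.find target_text original_slice
  if hguard : target_slice_idx ≠ -1 ∧ original_slice.length ≠ 0 then
    let target_space_idx := target_slice_idx + 3
    let targetPartsList' := targetPartsList ++ [String.ofList (PySem.List.slice target_text none (some target_space_idx))]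
    let origPartsList' := origPartsList ++ [String.ofList (PySem.List.slice original_text none (some original_space_idx))]
    let target_text' := PySem.List.slice target_text (some (target_space_idx + 1)) none
    let original_text' := PySem.List.slice original_text (some (original_space_idx + 1)) none
    if original_text'.length < 80 ∨ target_text'.length < 80 then
      (targetPartsList' ++ [String.ofList target_text'], origPartsList' ++ [String.ofList original_text'], "", "", -1, max_length)
    else
      let new_space_idx := PySem.Chars.findFrom original_text' [' '] max_length
      makeSplitCore targetPartsList' origPartsList' target_text' original_text' new_space_idx max_length
  else
    let idx_of_next_space := PySem.Chars.findFrom original_text [' '] (original_space_idx + 1)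
    if idx_of_next_space = -1 then
      (targetPartsList ++ [String.ofList target_text], origPartsList ++ [String.ofList original_text],
        String.ofList target_text, String.ofList original_text, idx_of_next_space, max_length)
    else
      makeSplitCore targetPartsList origPartsList target_text original_text idx_of_next_space max_length
termination_by (target_text.length, pvGap original_text original_space_idx)
decreasing_by
  · apply Prod.Lex.left
    have hpos := pv_find_window_pos target_text
      (PySem.List.slice original_text (some (original_space_idx - 3)) (some (original_space_idx + 3)))
      (by intro hw; exact hguard.2 (by simpa using congrArg List.length hw)) hguard.1
    exact pv_slice_from_length_lt _ _ (by omega) hpos.2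
  · exact Prod.Lex.right _ (pv_gap_decr _ _ (by assumption))

def makeSplit (targetPartsList : List String) (origPartsList : List String) (target_text : String) (original_text : String) (original_space_idx : Int) (max_length : Int) : List String × List String × String × String × Int × Int :=
  makeSplitCore targetPartsList origPartsList target_text.toList original_text.toList original_space_idx max_length

-- ===== PORT B =====
-- _scan: advance the space index until a nonempty aligned window is found in the target (or give up)
def pvScan (target_text original_text : List Char) (space_idx : Int) : Option (Int × Int) :=
  let window := PySem.List.slice original_text (some (space_idx - 3)) (some (space_idx + 3))
  let hit := if window ≠ [] then PySem.Chars.find target_text window else -1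
  if hit ≠ -1 then some (space_idx, hit)
  else
    let next := PySem.Chars.findFrom original_text [' '] (space_idx + 1)
    if next = -1 then none
    else pvScan target_text original_text next
termination_by pvGap original_text space_idx
decreasing_by
  exact pv_gap_decr _ _ (by assumption)

theorem pvScan_some (target_text original_text : List Char) (space_idx : Int)
    (si hit : Int) (h : pvScan target_text original_text space_idx = some (si, hit)) :
    0 ≤ hit ∧ target_text ≠ [] := by
  revert h
  induction space_idx using pvScan.induct target_text original_text with
  | case1 i w hv hh =>
    intro h
    simp only [w, hv, dite_eq_ite] at hh
    rw [pvScan] at h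
    rw [if_pos hh] at h
    obtain ⟨h1, h2⟩ := Prod.mk.injEq .. ▸ Option.some.inj h
    by_cases hw : PySem.List.slice original_text (some (i - 3)) (some (i + 3)) ≠ []
    · rw [if_pos hw] at h2 hh
      subst h2
      exact ⟨(pv_find_window_pos _ _ hw hh).1, (pv_find_window_pos _ _ hw hh).2⟩
    · rw [if_neg hw] at hh
      exact absurd rfl hh
  | case2 i w hv hh nx hn =>
    intro h
    simp only [w, hv, dite_eq_ite] at hh
    simp only [nx] at hn
    rw [pvScan] at h
    rw [if_neg hh, if_pos hn] at h
    exact absurd h (by simp)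
  | case3 i w hv hh nx hn ih =>
    intro h
    simp only [w, hv, dite_eq_ite] at hh
    simp only [nx] at hn
    rw [pvScan] at h
    rw [if_neg hh, if_neg hn] at h
    exact ih h

-- the flat outer loop performing the splits
def makeSplitLoop (targetPartsList origPartsList : List String) (target_text original_text : List Char)
    (space_idx max_length : Int) :
    List String × List String × String × String × Int × Int :=
  match hscan : pvScan target_text original_text space_idx with
  | none =>
      (targetPartsList ++ [String.ofList target_text], origPartsList ++ [String.ofList original_text],
        String.ofList target_text, String.ofList original_text, -1, max_length)
  | some (si, hit) =>
      let targetPartsList' := targetPartsList ++ [String.ofList (PySem.List.slice target_text none (some (hit + 3)))]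
      let origPartsList' := origPartsList ++ [String.ofList (PySem.List.slice original_text none (some si))]
      let target_text' := PySem.List.slice target_text (some (hit + 4)) none
      let original_text' := PySem.List.slice original_text (some (si + 1)) none
      if original_text'.length < 80 ∨ target_text'.length < 80 then
        (targetPartsList' ++ [String.ofList target_text'], origPartsList' ++ [String.ofList original_text'], "", "", -1, max_length)
      else
        makeSplitLoop targetPartsList' origPartsList' target_text' original_text'
          (PySem.Chars.findFrom original_text' [' '] max_length) max_length
termination_by target_text.length
decreasing_by
  have := pvScan_some _ _ _ _ _ hscan
  exact pv_slice_from_length_lt _ _ (by omega) this.2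

def makeSplit_alt (targetPartsList : List String) (origPartsList : List String) (target_text : String) (original_text : String) (original_space_idx : Int) (max_length : Int) : List String × List String × String × String × Int × Int :=
  makeSplitLoop targetPartsList origPartsList target_text.toList original_text.toList original_space_idx max_length

-- ===== PRECONDITION & SPEC =====
def Spec_makeSplit (targetPartsList : List String) (origPartsList : List String) (target_text : String) (original_text : String) (original_space_idx : Int) (max_length : Int) (out : List String × List String × String × String × Int × Int) : Prop := out = makeSplit_alt targetPartsList origPartsList target_text original_text original_space_idx max_length
instance (targetPartsList : List String) (origPartsList : List String) (target_text : String) (original_text : String) (original_space_idx : Int) (max_length : Int) (out : List String × List String × String × String × Int × Int) : Decidable (Spec_makeSplit targetPartsList origPartsList target_text original_text original_space_idx max_length out) := by unfold Spec_makeSplit; infer_instance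

-- ===== CLAIM (what is proved, stated in full; the proofs are below) =====
def Claim_equal_makeSplit : Prop := ∀ (targetPartsList : List String) (origPartsList : List String) (target_text : String) (original_text : String) (original_space_idx : Int) (max_length : Int), Dom_makeSplit targetPartsList origPartsList target_text original_text original_space_idx max_length → Spec_makeSplit targetPartsList origPartsList target_text original_text original_space_idx max_length (makeSplit targetPartsList origPartsList target_text original_text original_space_idx max_length)

-- ===== LEMMAS AND PROOFS =====

-- one-step unfolding lemmas for B's scan and loop
theorem pvScan_hit (tt ot : List Char) (i : Int)
    (hw : PySem.List.slice ot (some (i - 3)) (some (i + 3)) ≠ [])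
    (hf : PySem.Chars.find tt (PySem.List.slice ot (some (i - 3)) (some (i + 3))) ≠ -1) :
    pvScan tt ot i = some (i, PySem.Chars.find tt (PySem.List.slice ot (some (i - 3)) (some (i + 3)))) := by
  rw [pvScan, if_pos hw, if_pos hf]

theorem pvScan_miss (tt ot : List Char) (i : Int)
    (hg : (if PySem.List.slice ot (some (i - 3)) (some (i + 3)) ≠ [] then
        PySem.Chars.find tt (PySem.List.slice ot (some (i - 3)) (some (i + 3))) else -1) = -1) :
    pvScan tt ot i =
      if PySem.Chars.findFrom ot [' '] (i + 1) = -1 then none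
      else pvScan tt ot (PySem.Chars.findFrom ot [' '] (i + 1)) := by
  rw [pvScan, hg]
  simp

theorem pv_loop_none (tpl opl : List String) (tt ot : List Char) (i ml : Int)
    (h : pvScan tt ot i = none) :
    makeSplitLoop tpl opl tt ot i ml =
      (tpl ++ [String.ofList tt], opl ++ [String.ofList ot],
        String.ofList tt, String.ofList ot, -1, ml) := by
  rw [makeSplitLoop.eq_def]
  split
  · rfl
  · rename_i heq
    rw [h] at heq
    cases heq

theorem pv_loop_some (tpl opl : List String) (tt ot : List Char) (i ml si hit : Int)
    (h : pvScan tt ot i = some (si, hit)) :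
    makeSplitLoop tpl opl tt ot i ml =
      (if (PySem.List.slice ot (some (si + 1)) none).length < 80 ∨
          (PySem.List.slice tt (some (hit + 4)) none).length < 80 then
        (tpl ++ [String.ofList (PySem.List.slice tt none (some (hit + 3))), String.ofList (PySem.List.slice tt (some (hit + 4)) none)],
         opl ++ [String.ofList (PySem.List.slice ot none (some si)), String.ofList (PySem.List.slice ot (some (si + 1)) none)],
         "", "", -1, ml)
      else
        makeSplitLoop (tpl ++ [String.ofList (PySem.List.slice tt none (some (hit + 3)))])
          (opl ++ [String.ofList (PySem.List.slice ot none (some si))])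
          (PySem.List.slice tt (some (hit + 4)) none) (PySem.List.slice ot (some (si + 1)) none)
          (PySem.Chars.findFrom (PySem.List.slice ot (some (si + 1)) none) [' '] ml) ml) := by
  rw [makeSplitLoop.eq_def]
  split
  · rename_i heq
    rw [h] at heq
    cases heq
  · rename_i si' hit' heq
    rw [h] at heq
    obtain ⟨rfl, rfl⟩ : si = si' ∧ hit = hit' := by
      have := Option.some.inj heq
      exact ⟨congrArg Prod.fst this, congrArg Prod.snd this⟩
    simp only [List.append_assoc, List.singleton_append]

theorem pv_loop_congr (tpl opl : List String) (tt ot : List Char) (i j ml : Int)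
    (h : pvScan tt ot i = pvScan tt ot j) :
    makeSplitLoop tpl opl tt ot i ml = makeSplitLoop tpl opl tt ot j ml := by
  rcases h' : pvScan tt ot j with _ | ⟨si, hit⟩
  · rw [pv_loop_none _ _ _ _ _ _ (h.trans h'), pv_loop_none _ _ _ _ _ _ h']
  · rw [pv_loop_some _ _ _ _ _ _ _ _ (h.trans h'), pv_loop_some _ _ _ _ _ _ _ _ h']

theorem pv_core_eq_loop (targetPartsList origPartsList : List String)
    (target_text original_text : List Char) (original_space_idx max_length : Int) :
    makeSplitCore targetPartsList origPartsList target_text original_text original_space_idx max_length =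
    makeSplitLoop targetPartsList origPartsList target_text original_text original_space_idx max_length := by
  induction targetPartsList, origPartsList, target_text, original_text, original_space_idx
    using makeSplitCore.induct max_length with
  | case1 tpl opl tt ot i sl tsi hg tsp tt' ot' hb =>
    simp only [sl, tsi] at hg
    simp only [tt', ot', tsp, sl, tsi] at hb
    have hw : PySem.List.slice ot (some (i - 3)) (some (i + 3)) ≠ [] := by
      intro e
      exact hg.2 (by simpa using congrArg List.length e)
    have hscan := pvScan_hit tt ot i hw hg.1
    rw [makeSplitCore, dif_pos hg, if_pos hb, pv_loop_some _ _ _ _ _ _ _ _ hscan]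
    have e34 : PySem.Chars.find tt (PySem.List.slice ot (some (i - 3)) (some (i + 3))) + 3 + 1
        = PySem.Chars.find tt (PySem.List.slice ot (some (i - 3)) (some (i + 3))) + 4 := by ring
    rw [e34] at hb ⊢
    rw [if_pos hb]
    simp
  | case2 tpl opl tt ot i sl tsi hg tsp tpl' opl' tt' ot' hb nsi ih =>
    simp only [sl, tsi] at hg
    simp only [tt', ot', tsp, sl, tsi] at hb
    simp only [nsi, tpl', opl', tt', ot', tsp, sl, tsi] at ih
    have hw : PySem.List.slice ot (some (i - 3)) (some (i + 3)) ≠ [] := by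
      intro e
      exact hg.2 (by simpa using congrArg List.length e)
    have hscan := pvScan_hit tt ot i hw hg.1
    rw [makeSplitCore, dif_pos hg, if_neg hb, pv_loop_some _ _ _ _ _ _ _ _ hscan]
    have e34 : PySem.Chars.find tt (PySem.List.slice ot (some (i - 3)) (some (i + 3))) + 3 + 1
        = PySem.Chars.find tt (PySem.List.slice ot (some (i - 3)) (some (i + 3))) + 4 := by ring
    rw [e34] at hb ih ⊢
    rw [if_neg hb]
    exact ih
  | case3 tpl opl tt ot i sl tsi hg nxt hn =>
    simp only [sl, tsi] at hg
    simp only [nxt] at hn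
    have hgif : (if PySem.List.slice ot (some (i - 3)) (some (i + 3)) ≠ [] then
        PySem.Chars.find tt (PySem.List.slice ot (some (i - 3)) (some (i + 3))) else -1) = -1 := by
      rcases not_and_or.mp hg with h1 | h2
      · push Not at h1
        split <;> [exact h1; rfl]
      · push Not at h2
        rw [if_neg (by simpa using List.length_eq_zero_iff.mp h2)]
    have hscan : pvScan tt ot i = none := by
      rw [pvScan_miss tt ot i hgif, if_pos hn]
    rw [makeSplitCore, dif_neg hg, if_pos hn, pv_loop_none _ _ _ _ _ _ hscan, hn]
  | case4 tpl opl tt ot i sl tsi hg nxt hn ih =>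
    simp only [sl, tsi] at hg
    simp only [nxt] at hn ih
    have hgif : (if PySem.List.slice ot (some (i - 3)) (some (i + 3)) ≠ [] then
        PySem.Chars.find tt (PySem.List.slice ot (some (i - 3)) (some (i + 3))) else -1) = -1 := by
      rcases not_and_or.mp hg with h1 | h2
      · push Not at h1
        split <;> [exact h1; rfl]
      · push Not at h2
        rw [if_neg (by simpa using List.length_eq_zero_iff.mp h2)]
    have hscan : pvScan tt ot i = pvScan tt ot (PySem.Chars.findFrom ot [' '] (i + 1)) := by
      rw [pvScan_miss tt ot i hgif, if_neg hn]
    rw [makeSplitCore, dif_neg hg, if_neg hn, ih, pv_loop_congr _ _ _ _ _ _ _ hscan]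

-- ===== VERDICT (by name: the statement is the Claim_ definition above) =====
theorem makeSplit_spec : Claim_equal_makeSplit := by
  intro tpl opl tt ot osi ml _
  unfold Spec_makeSplit makeSplit makeSplit_alt
  exact pv_core_eq_loop tpl opl tt.toList ot.toList osi ml
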